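-- pv_equiv track=rewrite | github.com/christianebacani/Roadmap | Coding Challenges using Python and SQL/Code Wars Python Solved Problems/6 Kyu/kebabize.py | kebabize
-- ===== SOURCE A (Python) =====
-- def kebabize(st: str) -> str:
--     digits = '0123456789'
--
--     for i in range(len(digits)):
--         st = st.replace(digits[i], '')
--
--     formatted_st = ''
--
--     for i in range(len(st)):
--         if st[i].isupper():
--             formatted_st += ' '
--
--         formatted_st += st[i].lower()
--
--     return '-'.join(formatted_st.split())
-- ===== SOURCE B (Python) =====
-- def kebabize(st: str) -> str:
--     words = []
--     cur = ''
--     for c in st: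
--         if c in '0123456789':
--             continue
--         if c.isspace():
--             if cur:
--                 words.append(cur)
--             cur = ''
--         elif c.isupper():
--             if cur:
--                 words.append(cur)
--             cur = c.lower()
--         else:
--             cur += c
--     if cur:
--         words.append(cur)
--     return '-'.join(words)
-- ===== Notes on version B (the rewrite author's own statement) =====
-- stated objective: simpler
-- what changed: Single pass maintaining a word list and current word (skip digits, flush on whitespace, flush-and-start on uppercase) instead of A's three separate passes (10 replace() calls to delete digits, an insert-space-before-uppercase pass, then split()/join).
import Mathlib
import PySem

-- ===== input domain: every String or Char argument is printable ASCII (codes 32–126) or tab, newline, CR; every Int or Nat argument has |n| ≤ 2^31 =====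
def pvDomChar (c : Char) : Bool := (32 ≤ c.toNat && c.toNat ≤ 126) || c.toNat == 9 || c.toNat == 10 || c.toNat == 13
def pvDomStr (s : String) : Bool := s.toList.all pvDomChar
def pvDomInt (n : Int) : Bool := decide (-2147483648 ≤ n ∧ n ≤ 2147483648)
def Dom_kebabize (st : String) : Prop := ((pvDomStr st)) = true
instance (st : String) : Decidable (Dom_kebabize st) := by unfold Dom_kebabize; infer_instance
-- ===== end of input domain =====

-- B is a single pass building the word list directly (skip digits, flush on whitespace,
-- flush-and-start on uppercase) instead of A's replace-digits / insert-spaces / split-join passes.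

-- ===== PORT A =====
-- A: delete '0'..'9' via ten replace() calls, then insert ' ' before each uppercase while
-- lowercasing, then '-'.join(split()).  The formatted_st accumulator is carried as List Char
-- and wrapped with String.ofList at the end of the loop (exact: Python's str concatenation).
def kebabize (st : String) : String :=
  let digits : String := "0123456789"
  let st1 : String :=
    (PySem.List.pyRange 0 (PySem.List.len digits.toList)).foldl
      (fun acc j =>
        PySem.Str.replace acc (String.ofList [PySem.List.pyGetD digits.toList j ' ']) "")
      st
  let cs := st1.toList
  let formatted : List Char :=
    (PySem.List.pyRange 0 (PySem.List.len cs)).foldl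
      (fun acc j =>
        let d := PySem.List.pyGetD cs j ' '
        (if PySem.Chars.isupper d then acc ++ [' '] else acc) ++ [PySem.Chars.lowerChar d])
      []
  PySem.Str.join "-" (PySem.Str.split₀ (String.ofList formatted))

-- ===== PORT B =====
-- B: one fold over the characters with state (completed words, current word).
def kebabizeAltStep (s : List (List Char) × List Char) (c : Char) :
    List (List Char) × List Char :=
  if ("0123456789".toList.contains c) then s
  else if PySem.Chars.isspace c then
    (s.1 ++ (if s.2.isEmpty then [] else [s.2]), [])
  else if PySem.Chars.isupper c then
    (s.1 ++ (if s.2.isEmpty then [] else [s.2]), [PySem.Chars.lowerChar c])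
  else (s.1, s.2 ++ [c])

def kebabize_alt (st : String) : String :=
  let r := st.toList.foldl kebabizeAltStep ([], [])
  let ws := r.1 ++ (if r.2.isEmpty then [] else [r.2])
  String.ofList (PySem.Chars.join ['-'] ws)

-- ===== PRECONDITION & SPEC =====
def Spec_kebabize (st : String) (out : String) : Prop := out = kebabize_alt st
instance (st : String) (out : String) : Decidable (Spec_kebabize st out) := by unfold Spec_kebabize; infer_instance

-- ===== CLAIM (what is proved, stated in full; the proofs are below) =====
def Claim_equal_kebabize : Prop := ∀ (st : String), Dom_kebabize st → Spec_kebabize st (kebabize st)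

-- ===== LEMMAS AND PROOFS =====

-- character-class facts
lemma upper_bounds (c : Char) (h : PySem.Chars.isupper c = true) :
    65 ≤ c.toNat ∧ c.toNat ≤ 90 := by
  simpa [PySem.Chars.isupper, Char.le_def, UInt32.le_iff_toNat_le, Char.toNat_val] using h

lemma upper_not_space (c : Char) (h : PySem.Chars.isupper c = true) :
    PySem.Chars.isspace c = false := by
  have := upper_bounds c h
  simp [PySem.Chars.isspace]; omega

lemma lower_not_space (c : Char) (h : PySem.Chars.isupper c = true) :
    PySem.Chars.isspace (PySem.Chars.lowerChar c) = false := by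
  have hb := upper_bounds c h
  have hv : (c.toNat + 32).isValidChar := by left; omega
  have : (PySem.Chars.lowerChar c).toNat = c.toNat + 32 := by
    simp [PySem.Chars.lowerChar, h, Char.toNat_ofNat, hv]
  simp [PySem.Chars.isspace, this]; omega

lemma lower_id (c : Char) (h : PySem.Chars.isupper c = false) :
    PySem.Chars.lowerChar c = c := by
  simp [PySem.Chars.lowerChar, h]

-- replace with a single-character pattern and empty replacement is a filter
lemma replace_go_single (d : Char) :
    ∀ (fuel : Nat) (l acc : List Char), l.length ≤ fuel →
      PySem.Chars.replace.go [d] [] fuel l acc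
        = acc.reverse ++ l.filter (fun c => c ≠ d) := by
  intro fuel
  induction fuel with
  | zero =>
    intro l acc h
    have : l = [] := List.eq_nil_of_length_eq_zero (Nat.le_zero.mp h)
    subst this
    simp [PySem.Chars.replace.go]
  | succ n ih =>
    intro l acc h
    cases l with
    | nil => simp [PySem.Chars.replace.go]
    | cons c t =>
      by_cases hc : c = d
      · subst hc
        rw [PySem.Chars.replace.go,
          if_pos (show [c].isPrefixOf (c :: t) = true by simp [List.isPrefixOf])]
        simp only [List.length_cons, List.length_nil, Nat.zero_add, List.drop_one,
          List.tail_cons, List.reverse_nil, List.nil_append]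
        rw [ih t acc (by simpa using h)]
        simp
      · have hp : [d].isPrefixOf (c :: t) = false := by
          simp [List.isPrefixOf]
          exact fun hh => hc hh.symm
        rw [PySem.Chars.replace.go, if_neg (by simp [hp])]
        rw [ih t (c :: acc) (by simpa using h)]
        simp [hc]

lemma replace_single (d : Char) (s : List Char) :
    PySem.Chars.replace s [d] [] = s.filter (fun c => c ≠ d) := by
  rw [PySem.Chars.replace, if_neg (by simp)]
  exact replace_go_single d s.length s [] le_rfl

-- folding single-character replaces over a list of characters removes them all
lemma foldl_replace (ds : List Char) :
    ∀ (s : List Char),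
      ds.foldl (fun acc d => PySem.Chars.replace acc [d] []) s
        = s.filter (fun c => !(ds.contains c)) := by
  induction ds with
  | nil => intro s; simp
  | cons d ds ih =>
    intro s
    rw [List.foldl_cons, ih, replace_single, List.filter_filter]
    apply List.filter_congr
    intro c _
    by_cases hc : c = d <;> simp [hc]

-- push toList through a String-valued foldl
lemma foldl_toList {α : Type} (fS : String → α → String) (fL : List Char → α → List Char)
    (hf : ∀ s a, (fS s a).toList = fL s.toList a) :
    ∀ (l : List α) (s : String), (l.foldl fS s).toList = l.foldl fL s.toList := by
  intro l
  induction l with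
  | nil => intro s; rfl
  | cons a t ih => intro s; rw [List.foldl_cons, ih, hf, List.foldl_cons]

-- the expansion loop is a flatMap
def expandChar (c : Char) : List Char :=
  (if PySem.Chars.isupper c then [' '] else []) ++ [PySem.Chars.lowerChar c]

lemma expand_foldl (cs : List Char) :
    cs.foldl
        (fun acc c =>
          (if PySem.Chars.isupper c then acc ++ [' '] else acc) ++ [PySem.Chars.lowerChar c])
        []
      = cs.flatMap expandChar := by
  have h : ∀ (acc : List Char) (c : Char),
      (if PySem.Chars.isupper c then acc ++ [' '] else acc) ++ [PySem.Chars.lowerChar c]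
        = acc ++ expandChar c := by
    intro acc c
    by_cases hu : PySem.Chars.isupper c <;> simp [expandChar, hu]
  have hf : (fun (acc : List Char) (c : Char) =>
      (if PySem.Chars.isupper c then acc ++ [' '] else acc) ++ [PySem.Chars.lowerChar c])
      = (fun acc c => acc ++ expandChar c) := by
    funext acc c
    exact h acc c
  rw [hf]
  simpa using PySem.List.foldl_append_eq_flatMap expandChar cs []

def outWords (s : List (List Char) × List Char) : List (List Char) :=
  s.1 ++ (if s.2.isEmpty then [] else [s.2])

-- main invariant: split₀.go over the filtered-and-expanded characters equals B's fold
lemma split_go_main (cs : List Char) :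
    ∀ (cur : List Char) (acc : List (List Char)),
      PySem.Chars.split₀.go
          ((cs.filter (fun c => !(("0123456789".toList).contains c))).flatMap expandChar)
          cur acc
        = outWords (cs.foldl kebabizeAltStep (acc.reverse, cur.reverse)) := by
  induction cs with
  | nil =>
    intro cur acc
    simp only [List.filter_nil, List.flatMap_nil, List.foldl_nil, outWords]
    rw [PySem.Chars.split₀.go]
    by_cases hc : cur = [] <;> simp [hc]
  | cons c t ih =>
    intro cur acc
    by_cases hd : ("0123456789".toList).contains c
    · simp only [List.filter_cons, hd, Bool.not_true, List.foldl_cons]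
      rw [show kebabizeAltStep (acc.reverse, cur.reverse) c = (acc.reverse, cur.reverse) by
        simp only [kebabizeAltStep]; rw [if_pos hd]]
      exact ih cur acc
    · have hd' : ("0123456789".toList).contains c = false := by simpa using hd
      simp only [List.filter_cons, hd', Bool.not_false, if_true, List.flatMap_cons,
        List.foldl_cons]
      by_cases hs : PySem.Chars.isspace c
      · have hu : PySem.Chars.isupper c = false := by
          by_contra h
          have h' : PySem.Chars.isupper c = true := by simpa using h
          rw [upper_not_space c h'] at hs
          exact Bool.false_ne_true hs
        have hg : expandChar c = [c] := by
          simp [expandChar, hu, lower_id c hu]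
        rw [hg]
        rw [show kebabizeAltStep (acc.reverse, cur.reverse) c
            = (acc.reverse ++ (if cur.reverse.isEmpty then [] else [cur.reverse]), []) by
          simp only [kebabizeAltStep]; rw [if_neg hd, if_pos hs]]
        rw [List.singleton_append, PySem.Chars.split₀.go, if_pos hs]
        by_cases hc : cur = []
        · subst hc
          rw [if_pos (show ([] : List Char).isEmpty = true from rfl)]
          simp only [List.reverse_nil, List.isEmpty_nil]
          simpa using ih [] acc
        · rw [if_neg (show ¬(cur.isEmpty = true) by simpa using hc)]
          have := ih [] (cur.reverse :: acc)
          simp only [List.reverse_nil, List.reverse_cons] at this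
          rw [this]
          rw [if_neg (show ¬(cur.reverse.isEmpty = true) by simpa using hc)]
      · have hs' : PySem.Chars.isspace c = false := by simpa using hs
        by_cases hu : PySem.Chars.isupper c
        · have hg : expandChar c = [' ', PySem.Chars.lowerChar c] := by
            simp [expandChar, hu]
          rw [hg]
          rw [show kebabizeAltStep (acc.reverse, cur.reverse) c
              = (acc.reverse ++ (if cur.reverse.isEmpty then [] else [cur.reverse]),
                 [PySem.Chars.lowerChar c]) by
            simp only [kebabizeAltStep]; rw [if_neg hd, if_neg hs, if_pos hu]]
          rw [List.cons_append, PySem.Chars.split₀.go,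
            if_pos (show PySem.Chars.isspace ' ' = true by decide)]
          by_cases hc : cur = []
          · subst hc
            rw [if_pos (show ([] : List Char).isEmpty = true from rfl)]
            simp only [List.reverse_nil, List.isEmpty_nil]
            rw [List.singleton_append, PySem.Chars.split₀.go]
            rw [if_neg (by simp [lower_not_space c hu])]
            have := ih [PySem.Chars.lowerChar c] acc
            simpa using this
          · rw [if_neg (show ¬(cur.isEmpty = true) by simpa using hc)]
            rw [List.singleton_append, PySem.Chars.split₀.go]
            rw [if_neg (by simp [lower_not_space c hu])]
            have := ih [PySem.Chars.lowerChar c] (cur.reverse :: acc)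
            simp only [List.reverse_cons] at this
            rw [this]
            rw [if_neg (show ¬(cur.reverse.isEmpty = true) by simpa using hc)]
            simp
        · have hu' : PySem.Chars.isupper c = false := by simpa using hu
          have hg : expandChar c = [c] := by
            simp [expandChar, hu', lower_id c hu']
          rw [hg]
          rw [show kebabizeAltStep (acc.reverse, cur.reverse) c
              = (acc.reverse, cur.reverse ++ [c]) by
            simp only [kebabizeAltStep]; rw [if_neg hd, if_neg hs, if_neg hu]]
          rw [List.singleton_append, PySem.Chars.split₀.go]
          rw [if_neg (by simp [hs'])]
          have := ih (c :: cur) acc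
          simp only [List.reverse_cons] at this
          rw [this]

-- ===== VERDICT (by name: the statement is the Claim_ definition above) =====
theorem kebabize_spec : Claim_equal_kebabize := by
  intro st _
  show kebabize st = kebabize_alt st
  simp only [kebabize, kebabize_alt]
  -- A side: the first loop is a digit filter
  have h1 : ((PySem.List.pyRange 0 (PySem.List.len "0123456789".toList)).foldl
      (fun acc j =>
        PySem.Str.replace acc (String.ofList [PySem.List.pyGetD "0123456789".toList j ' ']) "")
      st).toList
      = st.toList.filter (fun c => !(("0123456789".toList).contains c)) := by
    rw [foldl_toList _
      (fun acc j => PySem.Chars.replace acc [PySem.List.pyGetD "0123456789".toList j ' '] [])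
      (by intro s a; simp [PySem.Str.toList_replace])]
    rw [PySem.List.foldl_pyRange_zero_pyGetD "0123456789".toList ' '
      (fun acc d => PySem.Chars.replace acc [d] [])]
    exact foldl_replace "0123456789".toList st.toList
  rw [h1]
  -- A side: the second loop is the flatMap expansion
  rw [PySem.List.foldl_pyRange_zero_pyGetD _ ' '
    (fun acc d =>
      (if PySem.Chars.isupper d then acc ++ [' '] else acc) ++ [PySem.Chars.lowerChar d])]
  rw [expand_foldl]
  -- both sides are String.ofList of the same character list
  rw [PySem.Str.join, PySem.Str.split₀]
  apply congrArg String.ofList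
  rw [List.map_map]
  have hmm : (String.toList ∘ String.ofList) = @id (List Char) := by
    funext l; simp
  rw [hmm, List.map_id]
  simp only [String.toList_ofList]
  apply congrArg (PySem.Chars.join ['-'])
  rw [PySem.Chars.split₀]
  have h2 := split_go_main st.toList [] []
  simp only [List.reverse_nil] at h2
  rw [h2]
  simp [outWords]
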